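-- pv_equiv track=rewrite | github.com/k-harada/AtCoder | AGC/AGC062/A.py | solve_greed
-- ===== SOURCE A (Python) =====
-- def solve_greed(s):
--     a_list = []
--     b_list = []
--     for i, c in enumerate(s[:-1]):
--         if c == "A":
--             a_list.append(i)
--         else:
--             b_list.append(i)
--     res = ""
--     for i in a_list:
--         res = res + s[i + 1]
--     for i in b_list:
--         res = res + s[i + 1]
--     return res
-- ===== SOURCE B (Python) =====
-- def solve_greed(s):
--     pairs = sorted(zip(s, s[1:]), key=lambda p: p[0] != "A")
--     return "".join(nxt for _, nxt in pairs)
-- ===== Notes on version B (the rewrite author's own statement) =====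
-- stated objective: alternative
-- what changed: B replaces A's index-list collection and two re-scanning output loops (quadratic string concatenation) with a stable sort of the (char, successor) pairs keyed on whether the first component is the marker letter, relying on sort stability to partition the successor characters, then a single join.
import Mathlib
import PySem

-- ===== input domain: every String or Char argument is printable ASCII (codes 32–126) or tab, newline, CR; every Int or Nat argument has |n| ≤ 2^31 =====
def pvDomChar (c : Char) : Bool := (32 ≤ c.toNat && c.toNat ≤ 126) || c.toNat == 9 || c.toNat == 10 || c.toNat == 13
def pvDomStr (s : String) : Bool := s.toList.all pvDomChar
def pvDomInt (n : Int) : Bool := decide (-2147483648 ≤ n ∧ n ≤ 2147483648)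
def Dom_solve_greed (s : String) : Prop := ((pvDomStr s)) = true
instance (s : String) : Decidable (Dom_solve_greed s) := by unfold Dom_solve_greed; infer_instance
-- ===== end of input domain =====

-- B replaces A's index lists and two re-scanning output loops by a stable sort of the
-- (char, successor) pairs keyed on p.1 != 'A', whose stability yields the same partition order.

-- ===== PORT A =====
-- A: enumerate s[:-1], collect indices into a_list/b_list, then two loops re-index s to build res.
-- (s[i+1] is always in range here, so the total pyGetD with an unused default is exact.)
def solve_greed (s : String) : String :=
  let cs := s.toList
  let acc := (PySem.List.enumerate (PySem.List.slice cs none (some (-1))) 0).foldl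
      (fun (acc : List Int × List Int) p =>
        if p.2 = 'A' then (acc.1 ++ [p.1], acc.2) else (acc.1, acc.2 ++ [p.1]))
      ([], [])
  let res := acc.1.foldl (fun r i => r ++ [PySem.List.pyGetD cs (i + 1) ' ']) []
  let res := acc.2.foldl (fun r i => r ++ [PySem.List.pyGetD cs (i + 1) ' ']) res
  String.ofList res

-- ===== PORT B =====
-- B: stable sort of zip(s, s[1:]) by the boolean key p[0] != 'A' (False < True, i.e. 0 < 1),
-- then join the successor components. PySem.List.sorted is Python's stable sorted.
def solve_greed_alt (s : String) : String :=
  let cs := s.toList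
  let pairs := PySem.List.sorted (cs.zip cs.tail)
      (fun p : Char × Char => if p.1 = 'A' then (0 : Int) else 1)
  String.ofList (pairs.map Prod.snd)

-- ===== PRECONDITION & SPEC =====
def Spec_solve_greed (s : String) (out : String) : Prop := out = solve_greed_alt s
instance (s : String) (out : String) : Decidable (Spec_solve_greed s out) := by unfold Spec_solve_greed; infer_instance

-- ===== CLAIM =====
def Claim_equal_solve_greed : Prop := ∀ (s : String), Dom_solve_greed s → Spec_solve_greed s (solve_greed s)

-- ===== LEMMAS AND PROOFS =====

-- A's two-buffer loop: a fold appending g x to the first or second buffer by p x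
theorem pairFold {α β : Type} (p : α → Prop) [DecidablePred p] (g : α → β) (l : List α)
    (a b : List β) :
    l.foldl (fun acc x => if p x then (acc.1 ++ [g x], acc.2) else (acc.1, acc.2 ++ [g x])) (a, b)
      = (a ++ (l.filter (fun x => decide (p x))).map g,
         b ++ (l.filter (fun x => !decide (p x))).map g) := by
  induction l generalizing a b with
  | nil => simp
  | cons x xs ih =>
      by_cases h : p x <;> simp [h, ih, List.append_assoc]

-- A's enumerated indices, sent through s[i+1], are exactly B's zip pairs
theorem enum_zip (l : List Char) :
    (PySem.List.enumerate l.dropLast 0).map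
        (fun p => (p.2, PySem.List.pyGetD l (p.1 + 1) ' ')) = l.zip l.tail := by
  apply List.ext_getElem
  · simp [PySem.List.length_enumerate, List.length_zip, List.length_dropLast, List.length_tail]
  · intro k h1 h2
    have hk : k < l.length - 1 := by
      simpa [PySem.List.length_enumerate, List.length_dropLast] using h1
    have hk1 : k + 1 < l.length := by omega
    have hget : PySem.List.pyGetD l ((k : Int) + 1) ' ' = l[k + 1] := by
      rw [show ((k : Int) + 1) = ((k + 1 : Nat) : Int) from by push_cast; ring,
        PySem.List.pyGetD_natCast]
      simp [List.getD_eq_getElem?_getD, List.getElem?_eq_getElem hk1]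
    simp [PySem.List.getElem_enumerate, List.getElem_zip, List.getElem_dropLast,
      List.getElem_tail, hget]

-- inserting x after a prefix it does not go before and before a suffix it does go before
theorem insertBy_middle {α : Type} (before : α → α → Bool) (x : α) (a b : List α)
    (ha : ∀ y ∈ a, before x y = false) (hb : ∀ y ∈ b, before x y = true) :
    PySem.List.insertBy before x (a ++ b) = a ++ x :: b := by
  induction a with
  | nil =>
      cases b with
      | nil => simp [PySem.List.insertBy]
      | cons y ys => simp [PySem.List.insertBy, hb y (by simp)]
  | cons z a ih =>
      simp [PySem.List.insertBy, ha z (by simp), ih (fun y hy => ha y (by simp [hy]))]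

-- invariant of the insertion-sort fold with the two-valued key: the state stays
-- "A-keyed prefix ++ B-keyed suffix"
theorem foldInsInv (xs : List (Char × Char)) (a b : List (Char × Char))
    (ha : ∀ p ∈ a, p.1 = 'A') (hb : ∀ p ∈ b, p.1 ≠ 'A') :
    xs.foldl (fun acc x => PySem.List.insertBy
        (fun u v => decide ((if u.1 = 'A' then (0 : Int) else 1) < (if v.1 = 'A' then (0 : Int) else 1)))
        x acc) (a ++ b)
      = (a ++ xs.filter (fun p => p.1 == 'A')) ++ (b ++ xs.filter (fun p => !(p.1 == 'A'))) := by
  induction xs generalizing a b with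
  | nil => simp
  | cons x xs ih =>
      by_cases hx : x.1 = 'A'
      · have hins : PySem.List.insertBy
            (fun u v => decide ((if u.1 = 'A' then (0 : Int) else 1) < (if v.1 = 'A' then (0 : Int) else 1)))
            x (a ++ b) = a ++ x :: b := by
          apply insertBy_middle
          · intro y hy; simp [hx, ha y hy]
          · intro y hy; simp [hx, hb y hy]
        have ha' : ∀ p ∈ a ++ [x], p.1 = 'A' := by
          intro p hp
          rcases List.mem_append.1 hp with h | h
          · exact ha p h
          · simp at h; simp [h, hx]
        have key := ih (a ++ [x]) b ha' hb
        rw [List.foldl_cons, hins, show a ++ x :: b = (a ++ [x]) ++ b by simp, key]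
        simp [hx, List.append_assoc]
      · have hins : PySem.List.insertBy
            (fun u v => decide ((if u.1 = 'A' then (0 : Int) else 1) < (if v.1 = 'A' then (0 : Int) else 1)))
            x (a ++ b) = (a ++ b) ++ [x] := by
          apply PySem.List.insertBy_of_forall_not_before
          intro y hy; simp [hx]; split <;> omega
        have hb' : ∀ p ∈ b ++ [x], p.1 ≠ 'A' := by
          intro p hp
          rcases List.mem_append.1 hp with h | h
          · exact hb p h
          · simp at h; simp [h, hx]
        have key := ih a (b ++ [x]) ha hb'
        rw [List.foldl_cons, hins, show (a ++ b) ++ [x] = a ++ (b ++ [x]) by simp, key]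
        simp [hx, List.append_assoc]

-- stable sort on the 0/1 key is exactly the stable partition
theorem sortedPartition (xs : List (Char × Char)) :
    PySem.List.sorted xs (fun p : Char × Char => if p.1 = 'A' then (0 : Int) else 1)
      = xs.filter (fun p => p.1 == 'A') ++ xs.filter (fun p => !(p.1 == 'A')) := by
  rw [PySem.List.sorted_eq_foldl_insertBy]
  simpa using foldInsInv xs [] [] (by simp) (by simp)

theorem decide_beq_char (c d : Char) : decide (c = d) = (c == d) := by
  by_cases h : c = d <;> simp [h]

theorem solve_greed_eq_alt (s : String) : solve_greed s = solve_greed_alt s := by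
  unfold solve_greed solve_greed_alt
  simp only [PySem.List.slice_to_neg_one,
    pairFold (fun p : Int × Char => p.2 = 'A') Prod.fst,
    PySem.List.foldl_append_singleton_eq_map, sortedPartition]
  rw [← enum_zip s.toList]
  simp [List.filter_map, List.map_map, Function.comp_def, decide_beq_char]

-- ===== VERDICT =====
theorem solve_greed_spec : Claim_equal_solve_greed := by
  intro s _
  exact solve_greed_eq_alt s
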